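-- pv_equiv track=rewrite | github.com/luciancz/MATE4001-Computational-Challenge-2025-26 | main.py | isValidPercolation
-- ===== SOURCE A (Python) =====
-- from queue import Queue
--
-- def isValidPercolation(grid, diagonals = True):
--     rows, columns = len(grid), len(grid[0])
--     dirs = [(0, 1), (1, 0), (0, -1), (-1, 0),
--             (1, 1), (-1, 1), (-1, -1), (1, -1)]
--     if diagonals == False:
--         dirs = [(0, 1), (1, 0), (0, -1), (-1, 0)]
--     queue = Queue()
--     visited = set()
--
--     # Add all top-row starts
--     for column in range(columns):
--         if grid[0][column] == 1:
--             queue.put((0, column))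
--             visited.add((0, column))
--
--     if queue.empty():
--         return False
--     while not queue.empty():
--         x, y = queue.get()
--
--         if x == rows - 1:
--             return True
--
--         for dx, dy in dirs:
--             nx, ny = x + dx, y + dy
--             if (
--                 0 <= nx < rows and
--                 0 <= ny < columns and
--                 grid[nx][ny] == 1 and
--                 (nx, ny) not in visited
--             ):
--                 visited.add((nx, ny))
--                 queue.put((nx, ny))
--
--     return False
-- ===== SOURCE B (Python) =====
-- def isValidPercolation(grid, diagonals = True):
--     rows, columns = len(grid), len(grid[0])
--     if diagonals:
--         dirs = [(0, 1), (1, 0), (0, -1), (-1, 0),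
--                 (1, 1), (-1, 1), (-1, -1), (1, -1)]
--     else:
--         dirs = [(0, 1), (1, 0), (0, -1), (-1, 0)]
--     # Start from every open cell of the top row, then saturate:
--     # repeatedly add every open cell adjacent to the reached region
--     # until a whole sweep adds nothing (at most rows*columns sweeps).
--     reach = {(0, c) for c in range(columns) if grid[0][c] == 1}
--     for _ in range(rows * columns):
--         new = {(x, y)
--                for x in range(rows) for y in range(columns)
--                if grid[x][y] == 1 and (x, y) not in reach
--                and any((x + dx, y + dy) in reach for dx, dy in dirs)}
--         if not new:
--             break
--         reach |= new
--     return any(x == rows - 1 for x, y in reach)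
-- ===== Notes on version B (the rewrite author's own statement) =====
-- stated objective: alternative
-- what changed: Replaces A's early-returning BFS with an explicit queue and visited set by a whole-grid fixpoint saturation: a set of reached cells is repeatedly grown by full sweeps over the grid until no sweep adds a cell, and the answer is whether any reached cell lies in the bottom row.
-- outside the precondition, e.g. on isValidPercolation([[0, 0], [1]], True): A returns False, B raises IndexError
import Mathlib
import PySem

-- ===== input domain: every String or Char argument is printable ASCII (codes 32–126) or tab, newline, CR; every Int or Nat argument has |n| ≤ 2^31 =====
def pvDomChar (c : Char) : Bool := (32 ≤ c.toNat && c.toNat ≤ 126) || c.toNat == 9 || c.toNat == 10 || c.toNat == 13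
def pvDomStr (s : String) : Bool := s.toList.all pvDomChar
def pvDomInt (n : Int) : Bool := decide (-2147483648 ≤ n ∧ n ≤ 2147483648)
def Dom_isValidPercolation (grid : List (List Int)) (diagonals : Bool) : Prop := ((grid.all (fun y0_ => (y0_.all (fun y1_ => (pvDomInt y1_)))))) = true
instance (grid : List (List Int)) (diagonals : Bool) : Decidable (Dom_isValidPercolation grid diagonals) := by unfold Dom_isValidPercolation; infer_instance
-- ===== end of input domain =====

-- B replaces A's BFS (queue + visited set, early return on a bottom-row pop) by a
-- whole-grid fixpoint saturation of the reached region; alternative algorithm, not faster.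

-- shared cell accessor: grid[x][y] as an Option (none exactly where Python raises IndexError)
def pvGet2 (grid : List (List Int)) (x y : Int) : Option Int :=
  match PySem.List.pyGet? grid x with
  | none => none
  | some row => PySem.List.pyGet? row y

-- ===== PORT A =====
-- inner 'for dx, dy in dirs' loop of A
def pvPushA (grid : List (List Int)) (rows cols x y : Int) :
    List (Int × Int) → List (Int × Int) → PySem.Set (Int × Int) →
    List (Int × Int) × PySem.Set (Int × Int)
  | [], q, v => (q, v)
  | d :: ds, q, v =>
    let nx := x + d.1
    let ny := y + d.2
    if 0 ≤ nx ∧ nx < rows ∧ 0 ≤ ny ∧ ny < cols ∧ pvGet2 grid nx ny = some 1 ∧ (nx, ny) ∉ v then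
      pvPushA grid rows cols x y ds (q ++ [(nx, ny)]) (PySem.Set.add v (nx, ny))
    else
      pvPushA grid rows cols x y ds q v

-- A's 'while not queue.empty()' loop; fuel = rows*columns+1 pops always suffice
-- (each pop was enqueued once, enqueued cells are pairwise distinct grid cells)
def pvBFS (grid : List (List Int)) (rows cols : Int) (dirs : List (Int × Int)) :
    Nat → List (Int × Int) → PySem.Set (Int × Int) → Bool
  | _, [], _ => false
  | 0, _ :: _, _ => false
  | fuel + 1, c :: rest, v =>
    if c.1 = rows - 1 then true
    else
      let qv := pvPushA grid rows cols c.1 c.2 dirs rest v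
      pvBFS grid rows cols dirs fuel qv.1 qv.2

def isValidPercolation (grid : List (List Int)) (diagonals : Bool) : Bool :=
  match PySem.List.pyGet? grid 0 with
  | none => false                    -- Python: IndexError on grid[0] (outside Pre_)
  | some row0 =>
    let rows : Int := grid.length
    let cols : Int := row0.length
    let dirs : List (Int × Int) :=
      if diagonals = false then [(0, 1), (1, 0), (0, -1), (-1, 0)]
      else [(0, 1), (1, 0), (0, -1), (-1, 0), (1, 1), (-1, 1), (-1, -1), (1, -1)]
    let qv := (PySem.List.pyRange 0 cols 1).foldl
      (fun qv col =>
        if pvGet2 grid 0 col = some 1 then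
          (qv.1 ++ [((0 : Int), col)], PySem.Set.add qv.2 ((0 : Int), col))
        else qv)
      ([], PySem.Set.empty)
    if qv.1 = [] then false
    else pvBFS grid rows cols dirs (grid.length * row0.length + 1) qv.1 qv.2

-- ===== PORT B =====
-- one whole-grid sweep: the open cells adjacent to the reached region (Source B's 'new')
def pvSweep (grid : List (List Int)) (rows cols : Int) (dirs : List (Int × Int))
    (reach : PySem.Set (Int × Int)) : List (Int × Int) :=
  (PySem.List.pyRange 0 rows 1).flatMap fun x =>
    ((PySem.List.pyRange 0 cols 1).filter fun y =>
      decide (pvGet2 grid x y = some 1) && !(PySem.Set.contains reach (x, y)) &&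
        (dirs.any fun d => PySem.Set.contains reach (x + d.1, y + d.2))).map
      fun y => (x, y)

-- Source B's 'for _ in range(rows * columns)' saturation loop with its early break
def pvIter (grid : List (List Int)) (rows cols : Int) (dirs : List (Int × Int)) :
    Nat → PySem.Set (Int × Int) → PySem.Set (Int × Int)
  | 0, r => r
  | fuel + 1, r =>
    let new := pvSweep grid rows cols dirs r
    if new = [] then r
    else pvIter grid rows cols dirs fuel (PySem.Set.update r new)

def isValidPercolation_alt (grid : List (List Int)) (diagonals : Bool) : Bool :=
  match PySem.List.pyGet? grid 0 with
  | none => false                    -- Python: IndexError on grid[0] (outside Pre_)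
  | some row0 =>
    let rows : Int := grid.length
    let cols : Int := row0.length
    let dirs : List (Int × Int) :=
      if diagonals then [(0, 1), (1, 0), (0, -1), (-1, 0), (1, 1), (-1, 1), (-1, -1), (1, -1)]
      else [(0, 1), (1, 0), (0, -1), (-1, 0)]
    let init : PySem.Set (Int × Int) := (PySem.List.pyRange 0 cols 1).foldl
      (fun s col => if pvGet2 grid 0 col = some 1 then PySem.Set.add s ((0 : Int), col) else s)
      PySem.Set.empty
    let final := pvIter grid rows cols dirs (grid.length * row0.length) init
    final.any fun c => decide (c.1 = rows - 1)

-- ===== PRECONDITION & SPEC =====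
-- Pre_ excludes exactly the grids on which the Pythons can hit an IndexError: the empty
-- grid (grid[0] raises) and ragged grids with a row shorter than row 0 (grid[nx][ny],
-- ny < columns, may raise); A still returns False on some such ragged grids its BFS
-- never touches (see cites) while B's whole-grid sweep raises there.
def Pre_isValidPercolation (grid : List (List Int)) (diagonals : Bool) : Prop :=
  grid ≠ [] ∧ ∀ row ∈ grid, (grid.headD []).length ≤ row.length
instance (grid : List (List Int)) (diagonals : Bool) : Decidable (Pre_isValidPercolation grid diagonals) := by unfold Pre_isValidPercolation; infer_instance

def pvWitness_isValidPercolation : List (List Int) × Bool := ([[1, 0], [1, 1]], true)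

def Spec_isValidPercolation (grid : List (List Int)) (diagonals : Bool) (out : Bool) : Prop := out = isValidPercolation_alt grid diagonals
instance (grid : List (List Int)) (diagonals : Bool) (out : Bool) : Decidable (Spec_isValidPercolation grid diagonals out) := by unfold Spec_isValidPercolation; infer_instance

-- ===== CLAIM (what is proved, stated in full; the proofs are below) =====
def Claim_equal_isValidPercolation : Prop := ∀ (grid : List (List Int)) (diagonals : Bool), Dom_isValidPercolation grid diagonals → Pre_isValidPercolation grid diagonals → Spec_isValidPercolation grid diagonals (isValidPercolation grid diagonals)

-- ===== LEMMAS AND PROOFS =====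

-- an in-bounds open cell (value 1)
def pvOk (grid : List (List Int)) (cols : Int) (c : Int × Int) : Prop :=
  0 ≤ c.1 ∧ c.1 < (grid.length : Int) ∧ 0 ≤ c.2 ∧ c.2 < cols ∧ pvGet2 grid c.1 c.2 = some 1

-- reachability from the top row through open cells along dirs
inductive pvReach (grid : List (List Int)) (cols : Int) (dirs : List (Int × Int)) :
    Int × Int → Prop
  | top (c : Int × Int) : pvOk grid cols c → c.1 = 0 → pvReach grid cols dirs c
  | step (c d : Int × Int) : pvReach grid cols dirs c → d ∈ dirs →
      pvOk grid cols (c.1 + d.1, c.2 + d.2) → pvReach grid cols dirs (c.1 + d.1, c.2 + d.2)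

-- "percolates": some reachable cell lies in the bottom row
def pvHit (grid : List (List Int)) (cols : Int) (dirs : List (Int × Int)) : Prop :=
  ∃ c, pvReach grid cols dirs c ∧ c.1 = (grid.length : Int) - 1

-- the open cells of the top row, in column order
def pvTop (grid : List (List Int)) (cols : Int) : List (Int × Int) :=
  ((PySem.List.pyRange 0 cols 1).filter fun col => decide (pvGet2 grid 0 col = some 1)).map
    fun col => ((0 : Int), col)

theorem pvTop_mem (grid : List (List Int)) (cols : Int) (c : Int × Int) :
    c ∈ pvTop grid cols ↔ c.1 = 0 ∧ 0 ≤ c.2 ∧ c.2 < cols ∧ pvGet2 grid 0 c.2 = some 1 := by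
  obtain ⟨a, b⟩ := c
  simp only [pvTop, List.mem_map, List.mem_filter, PySem.List.mem_pyRange_one,
    decide_eq_true_eq, Prod.mk.injEq]
  constructor
  · rintro ⟨col, ⟨⟨h0, h1⟩, h2⟩, rfl, rfl⟩
    exact ⟨rfl, h0, h1, h2⟩
  · rintro ⟨rfl, h0, h1, h2⟩
    exact ⟨b, ⟨⟨h0, h1⟩, h2⟩, rfl, rfl⟩

theorem pvTop_nodup (grid : List (List Int)) (cols : Int) : (pvTop grid cols).Nodup := by
  refine List.Nodup.map_on ?_ (List.Nodup.filter _ (PySem.List.nodup_pyRange_one _ _))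
  intro x hx y hy h
  simpa using h

-- a nodup list of in-bounds cells has at most rows*columns elements
theorem pvLenBound (grid : List (List Int)) (cols : Int) (v : List (Int × Int))
    (hnd : v.Nodup) (hok : ∀ c ∈ v, pvOk grid cols c) :
    v.length ≤ grid.length * cols.toNat := by
  have hinj : ∀ c ∈ v, ∀ c' ∈ v,
      c.1.toNat * cols.toNat + c.2.toNat = c'.1.toNat * cols.toNat + c'.2.toNat → c = c' := by
    rintro ⟨a, b⟩ hc ⟨a', b'⟩ hc' hEq
    obtain ⟨h1, h2, h3, h4, -⟩ := hok _ hc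
    obtain ⟨h1', h2', h3', h4', -⟩ := hok _ hc'
    simp only at h1 h2 h3 h4 h1' h2' h3' h4' hEq
    have hbC : b.toNat < cols.toNat := by omega
    have hbC' : b'.toNat < cols.toNat := by omega
    have hCpos : 0 < cols.toNat := by omega
    have e1 : (a.toNat * cols.toNat + b.toNat) / cols.toNat = a.toNat := by
      rw [Nat.mul_comm, Nat.mul_add_div hCpos]
      simp [Nat.div_eq_of_lt hbC]
    have e1' : (a'.toNat * cols.toNat + b'.toNat) / cols.toNat = a'.toNat := by
      rw [Nat.mul_comm, Nat.mul_add_div hCpos]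
      simp [Nat.div_eq_of_lt hbC']
    rw [hEq, e1'] at e1
    rw [show a.toNat = a'.toNat from e1.symm] at hEq
    have hb : b.toNat = b'.toNat := Nat.add_left_cancel hEq
    have : a = a' ∧ b = b' := by omega
    simp [this.1, this.2]
  have hmapnd : (v.map fun c => c.1.toNat * cols.toNat + c.2.toNat).Nodup :=
    hnd.map_on hinj
  have hsub : (v.map fun c => c.1.toNat * cols.toNat + c.2.toNat) ⊆
      List.range (grid.length * cols.toNat) := by
    intro n hn
    simp only [List.mem_map] at hn
    obtain ⟨c, hc, rfl⟩ := hn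
    obtain ⟨h1, h2, h3, h4, -⟩ := hok c hc
    have ha : c.1.toNat < grid.length := by omega
    have hb : c.2.toNat < cols.toNat := by omega
    rw [List.mem_range]
    calc c.1.toNat * cols.toNat + c.2.toNat < c.1.toNat * cols.toNat + cols.toNat := by omega
      _ = (c.1.toNat + 1) * cols.toNat := by ring
      _ ≤ grid.length * cols.toNat := Nat.mul_le_mul_right _ (by omega)
  have := (List.subperm_of_subset hmapnd hsub).length_le
  simpa using this

-- effect of the inner neighbour loop of A
theorem pvPushA_spec (grid : List (List Int)) (cols : Int) (x y : Int) :
    ∀ (ds : List (Int × Int)) (q v : List (Int × Int)),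
    ∃ news : List (Int × Int),
      pvPushA grid (grid.length : Int) cols x y ds q v = (q ++ news, v ++ news) ∧
      news.Nodup ∧
      (∀ n ∈ news, n ∉ v ∧ pvOk grid cols n ∧ ∃ d ∈ ds, n = (x + d.1, y + d.2)) ∧
      (∀ d ∈ ds, pvOk grid cols (x + d.1, y + d.2) → (x + d.1, y + d.2) ∈ v ++ news) := by
  intro ds
  induction ds with
  | nil =>
    intro q v
    exact ⟨[], by simp [pvPushA], List.nodup_nil, by simp, by simp⟩
  | cons d ds ih =>
    intro q v
    by_cases hg : 0 ≤ x + d.1 ∧ x + d.1 < (grid.length : Int) ∧ 0 ≤ y + d.2 ∧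
        y + d.2 < cols ∧ pvGet2 grid (x + d.1) (y + d.2) = some 1 ∧ (x + d.1, y + d.2) ∉ v
    · have hstep : pvPushA grid (grid.length : Int) cols x y (d :: ds) q v =
          pvPushA grid (grid.length : Int) cols x y ds (q ++ [(x + d.1, y + d.2)])
            (PySem.Set.add v (x + d.1, y + d.2)) := by
        simp only [pvPushA, if_pos hg]
      have hadd : PySem.Set.add v (x + d.1, y + d.2) = v ++ [(x + d.1, y + d.2)] :=
        PySem.Set.add_of_not_mem hg.2.2.2.2.2
      obtain ⟨news, h1, h2, h3, h4⟩ := ih (q ++ [(x + d.1, y + d.2)]) (v ++ [(x + d.1, y + d.2)])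
      refine ⟨(x + d.1, y + d.2) :: news, ?_, ?_, ?_, ?_⟩
      · rw [hstep, hadd, h1]; simp
      · refine List.nodup_cons.mpr ⟨fun hmem => ?_, h2⟩
        exact (h3 _ hmem).1 (by simp)
      · intro n hn
        rcases List.mem_cons.mp hn with rfl | hn'
        · exact ⟨hg.2.2.2.2.2,
            ⟨hg.1, hg.2.1, hg.2.2.1, hg.2.2.2.1, hg.2.2.2.2.1⟩,
            d, List.mem_cons_self .., rfl⟩
        · obtain ⟨hnv, hokn, dd, hdd, heq⟩ := h3 n hn'
          exact ⟨fun hv' => hnv (List.mem_append_left _ hv'), hokn,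
            dd, List.mem_cons_of_mem _ hdd, heq⟩
      · intro d' hd' hok'
        rcases List.mem_cons.mp hd' with rfl | hd''
        · simp
        · have := h4 d' hd'' hok'
          simpa [List.append_assoc] using this
    · have hstep : pvPushA grid (grid.length : Int) cols x y (d :: ds) q v =
          pvPushA grid (grid.length : Int) cols x y ds q v := by
        simp only [pvPushA, if_neg hg]
      obtain ⟨news, h1, h2, h3, h4⟩ := ih q v
      refine ⟨news, by rw [hstep, h1], h2, ?_, ?_⟩
      · intro n hn
        obtain ⟨hnv, hokn, dd, hdd, heq⟩ := h3 n hn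
        exact ⟨hnv, hokn, dd, List.mem_cons_of_mem _ hdd, heq⟩
      · intro d' hd' hok'
        rcases List.mem_cons.mp hd' with rfl | hd''
        · have hmemv : (x + d'.1, y + d'.2) ∈ v := by
            by_contra hmem
            exact hg ⟨hok'.1, hok'.2.1, hok'.2.2.1, hok'.2.2.2.1, hok'.2.2.2.2, hmem⟩
          exact List.mem_append_left _ hmemv
        · exact h4 d' hd'' hok'

-- the BFS loop invariant
def pvInvA (grid : List (List Int)) (cols : Int) (dirs : List (Int × Int))
    (q v : List (Int × Int)) : Prop :=
  q.Nodup ∧ v.Nodup ∧ (∀ c ∈ q, c ∈ v) ∧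
  (∀ c ∈ v, pvOk grid cols c ∧ pvReach grid cols dirs c) ∧
  (∀ c ∈ v, c ∉ q → c.1 ≠ (grid.length : Int) - 1 ∧
     ∀ d ∈ dirs, pvOk grid cols (c.1 + d.1, c.2 + d.2) → (c.1 + d.1, c.2 + d.2) ∈ v) ∧
  (∀ col : Int, 0 ≤ col → col < cols → pvGet2 grid 0 col = some 1 → ((0 : Int), col) ∈ v)

theorem pvBFS_iff (grid : List (List Int)) (cols : Int) (dirs : List (Int × Int)) :
    ∀ (fuel : Nat) (q v : List (Int × Int)),
      pvInvA grid cols dirs q v →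
      q.length + (grid.length * cols.toNat - v.length) < fuel →
      (pvBFS grid (grid.length : Int) cols dirs fuel q v = true ↔ pvHit grid cols dirs) := by
  intro fuel
  induction fuel with
  | zero =>
    intro q v _ hlt
    exact absurd hlt (Nat.not_lt_zero _)
  | succ fuel ih =>
    intro q v hInv hlt
    obtain ⟨hqnd, hvnd, hqv, hvok, hcl, htop⟩ := hInv
    cases q with
    | nil =>
      simp only [pvBFS, Bool.false_eq_true, false_iff]
      rintro ⟨c, hreach, hc1⟩
      have hmem : ∀ e, pvReach grid cols dirs e → e ∈ v := by
        intro e he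
        induction he with
        | top e hok h0 =>
          have h := htop e.2 hok.2.2.1 hok.2.2.2.1 (h0 ▸ hok.2.2.2.2)
          have he' : e = ((0 : Int), e.2) := by
            obtain ⟨e1, e2⟩ := e; simp only at h0; rw [h0]
          rw [he']; exact h
        | step e d he hd hok ih2 =>
          exact (hcl e ih2 (List.not_mem_nil)).2 d hd hok
      exact (hcl c (hmem c hreach) (List.not_mem_nil)).1 hc1
    | cons c rest =>
      simp only [pvBFS]
      by_cases hbot : c.1 = (grid.length : Int) - 1
      · simp only [if_pos hbot, true_iff]
        exact ⟨c, (hvok c (hqv c (List.mem_cons_self ..))).2, hbot⟩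
      · simp only [if_neg hbot]
        obtain ⟨news, heq, hnnd, hprops, hcov⟩ := pvPushA_spec grid cols c.1 c.2 dirs rest v
        rw [heq]
        have hcv : c ∈ v := hqv c (List.mem_cons_self ..)
        have hcrest : c ∉ rest := (List.nodup_cons.mp hqnd).1
        have hrestnd : rest.Nodup := (List.nodup_cons.mp hqnd).2
        have hnews_nv : ∀ n ∈ news, n ∉ v := fun n hn => (hprops n hn).1
        have hnewsok : ∀ n ∈ news, pvOk grid cols n := fun n hn => (hprops n hn).2.1
        have hnews_reach : ∀ n ∈ news, pvReach grid cols dirs n := by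
          intro n hn
          obtain ⟨-, hok, d, hd, rfl⟩ := hprops n hn
          exact pvReach.step c d (hvok c hcv).2 hd hok
        have hv'nd : (v ++ news).Nodup :=
          List.Nodup.append hvnd hnnd (fun a ha ha' => hnews_nv a ha' ha)
        have hv'ok : ∀ a ∈ v ++ news, pvOk grid cols a := by
          intro a ha
          rcases List.mem_append.mp ha with h | h
          · exact (hvok a h).1
          · exact hnewsok a h
        have hlen := pvLenBound grid cols (v ++ news) hv'nd hv'ok
        refine ih (rest ++ news) (v ++ news)
          ⟨?_, hv'nd, ?_, ?_, ?_, ?_⟩ ?_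
        · exact List.Nodup.append hrestnd hnnd
            (fun a ha ha' => hnews_nv a ha' (hqv a (List.mem_cons_of_mem _ ha)))
        · intro a ha
          rcases List.mem_append.mp ha with h | h
          · exact List.mem_append_left _ (hqv a (List.mem_cons_of_mem _ h))
          · exact List.mem_append_right _ h
        · intro a ha
          rcases List.mem_append.mp ha with h | h
          · exact ⟨(hvok a h).1, (hvok a h).2⟩
          · exact ⟨hnewsok a h, hnews_reach a h⟩
        · intro e he henq'
          rcases List.mem_append.mp he with hev | hen
          · by_cases hec : e = c
            · subst hec
              exact ⟨hbot, fun d hd hok => hcov d hd hok⟩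
            · have henq : e ∉ c :: rest := by
                simp only [List.mem_cons]
                rintro (rfl | hr)
                · exact hec rfl
                · exact henq' (List.mem_append_left _ hr)
              obtain ⟨hb, hnb⟩ := hcl e hev henq
              exact ⟨hb, fun d hd hok => List.mem_append_left _ (hnb d hd hok)⟩
          · exact absurd (List.mem_append_right _ hen) henq'
        · intro col h0 h1 h2
          exact List.mem_append_left _ (htop col h0 h1 h2)
        · simp only [List.length_append, List.length_cons] at hlt hlen ⊢
          omega

-- A's top-row initialisation loop, split into its two components
theorem pvFoldA_eq (grid : List (List Int)) (l : List Int) :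
    l.foldl
      (fun qv col =>
        if pvGet2 grid 0 col = some 1 then
          (qv.1 ++ [((0 : Int), col)], PySem.Set.add qv.2 ((0 : Int), col))
        else qv)
      ([], PySem.Set.empty)
    = ((l.filter fun col => decide (pvGet2 grid 0 col = some 1)).map fun col => ((0 : Int), col),
       PySem.Set.ofList ((l.filter fun col => decide (pvGet2 grid 0 col = some 1)).map fun col => ((0 : Int), col))) := by
  suffices h : ∀ (l : List Int) (q : List (Int × Int)) (v : PySem.Set (Int × Int)),
      l.foldl
        (fun qv col =>
          if pvGet2 grid 0 col = some 1 then
            (qv.1 ++ [((0 : Int), col)], PySem.Set.add qv.2 ((0 : Int), col))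
          else qv)
        (q, v)
      = (q ++ (l.filter fun col => decide (pvGet2 grid 0 col = some 1)).map
          (fun col => ((0 : Int), col)),
         PySem.Set.update v ((l.filter fun col => decide (pvGet2 grid 0 col = some 1)).map
          (fun col => ((0 : Int), col)))) by
    rw [h]
    simp [PySem.Set.update_nil_left]
  intro l
  induction l with
  | nil => intro q v; simp [PySem.Set.update_nil]
  | cons a l ih =>
    intro q v
    by_cases h : pvGet2 grid 0 a = some 1
    · simp only [List.foldl_cons, List.filter_cons, h, decide_true, if_pos, List.map_cons, ih,
        PySem.Set.update_cons]
      simp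
    · simp only [List.foldl_cons, List.filter_cons, h, decide_false, if_neg, ih]
      simp [h]

-- B's top-row initialisation loop
theorem pvFoldB_eq (grid : List (List Int)) (l : List Int) :
    l.foldl
      (fun s col => if pvGet2 grid 0 col = some 1 then PySem.Set.add s ((0 : Int), col) else s)
      PySem.Set.empty
    = PySem.Set.ofList ((l.filter fun col => decide (pvGet2 grid 0 col = some 1)).map fun col => ((0 : Int), col)) := by
  suffices h : ∀ (l : List Int) (s : PySem.Set (Int × Int)),
      l.foldl
        (fun s col => if pvGet2 grid 0 col = some 1 then PySem.Set.add s ((0 : Int), col) else s)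
        s
      = PySem.Set.update s ((l.filter fun col => decide (pvGet2 grid 0 col = some 1)).map
          (fun col => ((0 : Int), col))) by
    rw [h]; exact PySem.Set.update_nil_left _
  intro l
  induction l with
  | nil => intro s; simp [PySem.Set.update_nil]
  | cons a l ih =>
    intro s
    by_cases h : pvGet2 grid 0 a = some 1
    · simp only [List.foldl_cons, List.filter_cons, h, decide_true, if_pos, List.map_cons, ih,
        PySem.Set.update_cons]
    · simp only [List.foldl_cons, List.filter_cons, h, decide_false, if_neg, ih]
      simp [h]

theorem pvReach_top_exists (grid : List (List Int)) (cols : Int) (dirs : List (Int × Int))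
    (c : Int × Int) (h : pvReach grid cols dirs c) : ∃ e, e ∈ pvTop grid cols := by
  induction h with
  | top c hok h0 =>
    exact ⟨c, (pvTop_mem grid cols c).mpr ⟨h0, hok.2.2.1, hok.2.2.2.1, h0 ▸ hok.2.2.2.2⟩⟩
  | step c d hc hd hok ih => exact ih

-- membership in one sweep of B
theorem pvSweep_mem (grid : List (List Int)) (cols : Int) (dirs : List (Int × Int))
    (r : List (Int × Int)) (c : Int × Int) :
    c ∈ pvSweep grid (grid.length : Int) cols dirs r ↔
      pvOk grid cols c ∧ c ∉ r ∧ ∃ d ∈ dirs, (c.1 + d.1, c.2 + d.2) ∈ r := by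
  
  obtain ⟨a, b⟩ := c
  simp only [pvSweep, List.mem_flatMap, List.mem_map, List.mem_filter,
    PySem.List.mem_pyRange_one, Bool.and_eq_true, Bool.not_eq_eq_eq_not, Bool.not_true,
    PySem.Set.contains_eq_listContains, List.contains_eq_mem, decide_eq_true_eq,
    decide_eq_false_iff_not, List.any_eq_true, Prod.mk.injEq, pvOk]
  constructor
  · rintro ⟨x, ⟨hx0, hx1⟩, y, ⟨⟨hy0, hy1⟩, ⟨hget, hnin⟩, d, hd, hnbr⟩, rfl, rfl⟩
    exact ⟨⟨hx0, hx1, hy0, hy1, hget⟩, hnin, d, hd, hnbr⟩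
  · rintro ⟨⟨h1, h2, h3, h4, h5⟩, hnin, d, hd, hnbr⟩
    exact ⟨a, ⟨h1, h2⟩, b, ⟨⟨h3, h4⟩, ⟨h5, hnin⟩, d, hd, hnbr⟩, rfl, rfl⟩

theorem pvIter_subset (grid : List (List Int)) (cols : Int) (dirs : List (Int × Int)) :
    ∀ (fuel : Nat) (r : PySem.Set (Int × Int)) (c : Int × Int), c ∈ r →
      c ∈ pvIter grid (grid.length : Int) cols dirs fuel r := by
  
  intro fuel
  induction fuel with
  | zero => intro r c hc; simpa [pvIter] using hc
  | succ fuel ih =>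
    intro r c hc
    simp only [pvIter]
    by_cases h : pvSweep grid (grid.length : Int) cols dirs r = []
    · simp only [h, if_pos]; exact hc
    · simp only [h, if_false]
      exact ih _ _ ((PySem.Set.mem_update _ _ _).mpr (Or.inl hc))

theorem pvIter_sound (grid : List (List Int)) (cols : Int) (dirs : List (Int × Int))
    (hsym : ∀ d ∈ dirs, ((-d.1, -d.2) : Int × Int) ∈ dirs) :
    ∀ (fuel : Nat) (r : PySem.Set (Int × Int)),
      (∀ c ∈ r, pvReach grid cols dirs c) →
      ∀ c ∈ pvIter grid (grid.length : Int) cols dirs fuel r, pvReach grid cols dirs c := by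
  
  intro fuel
  induction fuel with
  | zero => intro r hr c hc; exact hr c (by simpa [pvIter] using hc)
  | succ fuel ih =>
    intro r hr c hc
    simp only [pvIter] at hc
    by_cases h : pvSweep grid (grid.length : Int) cols dirs r = []
    · simp only [h, if_pos] at hc; exact hr c hc
    · simp only [h, if_false] at hc
      refine ih _ ?_ c hc
      intro e he
      rcases (PySem.Set.mem_update _ _ _).mp he with he' | he'
      · exact hr e he'
      · obtain ⟨hok, -, d, hd, hnbr⟩ := (pvSweep_mem grid cols dirs r e).mp he'
        have hok' : pvOk grid cols (e.1 + d.1 + -d.1, e.2 + d.2 + -d.2) := by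
          have heq : ((e.1 + d.1 + -d.1, e.2 + d.2 + -d.2) : Int × Int) = e := by
            obtain ⟨e1, e2⟩ := e; simp
          rw [heq]; exact hok
        have hr' := pvReach.step _ (-d.1, -d.2) (hr _ hnbr) (hsym d hd) hok'
        have heq : ((e.1 + d.1 + -d.1, e.2 + d.2 + -d.2) : Int × Int) = e := by
          obtain ⟨e1, e2⟩ := e; simp
        rwa [heq] at hr' 

theorem pvIter_closed (grid : List (List Int)) (cols : Int) (dirs : List (Int × Int)) :
    ∀ (fuel : Nat) (r : PySem.Set (Int × Int)),
      r.Nodup → (∀ c ∈ r, pvOk grid cols c) →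
      grid.length * cols.toNat + 1 ≤ fuel + r.length →
      ∀ c : Int × Int, pvOk grid cols c →
        (∃ d ∈ dirs, (c.1 + d.1, c.2 + d.2) ∈ pvIter grid (grid.length : Int) cols dirs fuel r) →
        c ∈ pvIter grid (grid.length : Int) cols dirs fuel r := by
  
  intro fuel
  induction fuel with
  | zero =>
    intro r hnd hok hbound c _ _
    have := pvLenBound grid cols r hnd hok
    omega
  | succ fuel ih =>
    intro r hnd hok hbound c hokc hnbr
    by_cases h : pvSweep grid (grid.length : Int) cols dirs r = []
    · simp only [pvIter, h, if_pos] at hnbr ⊢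
      by_cases hc : c ∈ r
      · exact hc
      · exfalso
        have : c ∈ pvSweep grid (grid.length : Int) cols dirs r :=
          (pvSweep_mem grid cols dirs r c).mpr ⟨hokc, hc, hnbr⟩
        rw [h] at this
        exact List.not_mem_nil this
    · simp only [pvIter, h, if_false] at hnbr ⊢
      obtain ⟨n, hn⟩ := List.exists_mem_of_ne_nil _ h
      have hnin : n ∉ r := ((pvSweep_mem grid cols dirs r n).mp hn).2.1
      have hfl : n ∈ (PySem.Set.ofList (pvSweep grid (grid.length : Int) cols dirs r)).filter
          (fun y => !(PySem.Set.contains r y)) := by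
        refine List.mem_filter.mpr ⟨(PySem.Set.mem_ofList _ _).mpr hn, ?_⟩
        simp only [Bool.not_eq_eq_eq_not, Bool.not_true, PySem.Set.contains_eq_listContains,
          List.contains_eq_mem, decide_eq_false_iff_not]
        exact hnin
      have hlen : r.length + 1 ≤ (PySem.Set.update r (pvSweep grid (grid.length : Int) cols dirs r)).length := by
        rw [PySem.Set.update_eq_append_filter, List.length_append]
        have := List.length_pos_of_mem hfl
        omega
      refine ih (PySem.Set.update r (pvSweep grid (grid.length : Int) cols dirs r))
        (PySem.Set.nodup_update _ _ hnd) ?_ (by omega) c hokc hnbr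
      intro e he
      rcases (PySem.Set.mem_update _ _ _).mp he with he' | he'
      · exact hok e he'
      · exact ((pvSweep_mem grid cols dirs r e).mp he').1

-- both programs decide pvHit
theorem pvA_iff (grid : List (List Int)) (row0 : List Int) (diagonals : Bool)
    (h : PySem.List.pyGet? grid 0 = some row0)
    (dirs : List (Int × Int))
    (hdirs : dirs = if diagonals = false then [((0:Int), (1:Int)), (1, 0), (0, -1), (-1, 0)]
      else [(0, 1), (1, 0), (0, -1), (-1, 0), (1, 1), (-1, 1), (-1, -1), (1, -1)]) :
    (isValidPercolation grid diagonals = true ↔ pvHit grid (row0.length : Int) dirs) := by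
  
  have hgne : grid ≠ [] := by rintro rfl; simp [PySem.List.pyGet?] at h
  have hlenpos : 0 < grid.length := List.length_pos_of_ne_nil hgne
  have hTok : ∀ c ∈ pvTop grid (row0.length : Int), pvOk grid (row0.length : Int) c := by
    intro c hc
    obtain ⟨h0, h1, h2, h3⟩ := (pvTop_mem _ _ _).mp hc
    exact ⟨le_of_eq h0.symm, by rw [h0]; exact_mod_cast hlenpos, h1, h2, by rw [h0]; exact h3⟩
  simp only [isValidPercolation, h]
  rw [pvFoldA_eq]
  rw [show ((PySem.List.pyRange 0 (row0.length : Int) 1).filter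
        fun col => decide (pvGet2 grid 0 col = some 1)).map (fun col => ((0 : Int), col))
      = pvTop grid (row0.length : Int) from rfl]
  rw [PySem.Set.ofList_eq_self_of_nodup _ (pvTop_nodup _ _)]
  rw [← hdirs]
  by_cases hT : pvTop grid (row0.length : Int) = []
  · rw [if_pos hT]
    simp only [Bool.false_eq_true, false_iff]
    rintro ⟨c, hreach, -⟩
    obtain ⟨e, he⟩ := pvReach_top_exists _ _ _ _ hreach
    rw [hT] at he
    exact List.not_mem_nil he
  · rw [if_neg hT]
    refine pvBFS_iff grid _ dirs _ _ _
      ⟨pvTop_nodup _ _, pvTop_nodup _ _, fun c hc => hc,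
       fun c hc => ⟨hTok c hc, pvReach.top c (hTok c hc) ((pvTop_mem _ _ _).mp hc).1⟩,
       fun c hc hnc => absurd hc hnc,
       fun col h0 h1 h2 => (pvTop_mem _ _ _).mpr ⟨rfl, h0, h1, h2⟩⟩ ?_
    have hN := pvLenBound grid (row0.length : Int) _ (pvTop_nodup _ _) hTok
    simp only [Int.toNat_natCast] at hN ⊢
    omega

theorem pvB_iff (grid : List (List Int)) (row0 : List Int) (diagonals : Bool)
    (h : PySem.List.pyGet? grid 0 = some row0)
    (dirs : List (Int × Int))
    (hdirs : dirs = if diagonals then [((0:Int), (1:Int)), (1, 0), (0, -1), (-1, 0), (1, 1), (-1, 1), (-1, -1), (1, -1)]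
      else [(0, 1), (1, 0), (0, -1), (-1, 0)])
    (hsym : ∀ d ∈ dirs, ((-d.1, -d.2) : Int × Int) ∈ dirs) :
    (isValidPercolation_alt grid diagonals = true ↔ pvHit grid (row0.length : Int) dirs) := by
  
  have hgne : grid ≠ [] := by rintro rfl; simp [PySem.List.pyGet?] at h
  have hlenpos : 0 < grid.length := List.length_pos_of_ne_nil hgne
  have hTok : ∀ c ∈ pvTop grid (row0.length : Int), pvOk grid (row0.length : Int) c := by
    intro c hc
    obtain ⟨h0, h1, h2, h3⟩ := (pvTop_mem _ _ _).mp hc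
    exact ⟨le_of_eq h0.symm, by rw [h0]; exact_mod_cast hlenpos, h1, h2, by rw [h0]; exact h3⟩
  simp only [isValidPercolation_alt, h]
  rw [pvFoldB_eq]
  rw [show ((PySem.List.pyRange 0 (row0.length : Int) 1).filter
        fun col => decide (pvGet2 grid 0 col = some 1)).map (fun col => ((0 : Int), col))
      = pvTop grid (row0.length : Int) from rfl]
  rw [PySem.Set.ofList_eq_self_of_nodup _ (pvTop_nodup _ _)]
  rw [← hdirs]
  rw [List.any_eq_true]
  simp only [decide_eq_true_eq]
  constructor
  · rintro ⟨c, hcF, hc1⟩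
    exact ⟨c, pvIter_sound grid _ dirs hsym _ _
      (fun e he => pvReach.top e (hTok e he) ((pvTop_mem _ _ _).mp he).1) c hcF, hc1⟩
  · rintro ⟨c, hreach, hc1⟩
    refine ⟨c, ?_, hc1⟩
    obtain ⟨e, heT⟩ := pvReach_top_exists _ _ _ _ hreach
    have hTne : pvTop grid (row0.length : Int) ≠ [] := List.ne_nil_of_mem heT
    have hTpos : 0 < (pvTop grid (row0.length : Int)).length := List.length_pos_of_ne_nil hTne
    have hbound : grid.length * ((row0.length : Int)).toNat + 1 ≤
        grid.length * row0.length + (pvTop grid (row0.length : Int)).length := by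
      simp only [Int.toNat_natCast]; omega
    have hclosed := pvIter_closed grid _ dirs (grid.length * row0.length)
      (pvTop grid (row0.length : Int)) (pvTop_nodup _ _) hTok hbound
    have hsub := pvIter_subset grid (row0.length : Int) dirs (grid.length * row0.length)
      (pvTop grid (row0.length : Int))
    clear hc1 heT hTne hTpos hbound
    induction hreach with
    | top c hok h0 =>
      exact hsub c ((pvTop_mem _ _ _).mpr ⟨h0, hok.2.2.1, hok.2.2.2.1, h0 ▸ hok.2.2.2.2⟩)
    | step c d hc hd hok ih =>
      refine hclosed _ hok ⟨(-d.1, -d.2), hsym d hd, ?_⟩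
      simpa using ih

theorem pv_equal (grid : List (List Int)) (diagonals : Bool) :
    isValidPercolation grid diagonals = isValidPercolation_alt grid diagonals := by
  
  have hboth : ∀ (x y : Bool) (P : Prop), (x = true ↔ P) → (y = true ↔ P) → x = y := by
    intro x y P h1 h2
    cases x <;> cases y <;> simp_all
  cases hg : PySem.List.pyGet? grid 0 with
  | none => simp [isValidPercolation, isValidPercolation_alt, hg]
  | some row0 =>
    cases diagonals with
    | false =>
      exact hboth _ _ _
        (pvA_iff grid row0 false hg [((0:Int), (1:Int)), (1, 0), (0, -1), (-1, 0)] (by simp))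
        (pvB_iff grid row0 false hg [((0:Int), (1:Int)), (1, 0), (0, -1), (-1, 0)] (by simp)
          (by decide))
    | true =>
      exact hboth _ _ _
        (pvA_iff grid row0 true hg
          [((0:Int), (1:Int)), (1, 0), (0, -1), (-1, 0), (1, 1), (-1, 1), (-1, -1), (1, -1)]
          (by simp))
        (pvB_iff grid row0 true hg
          [((0:Int), (1:Int)), (1, 0), (0, -1), (-1, 0), (1, 1), (-1, 1), (-1, -1), (1, -1)]
          (by simp) (by decide))

-- ===== VERDICT (by name: the statement is the Claim_ definition above) =====
theorem isValidPercolation_spec : Claim_equal_isValidPercolation := by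
  intro grid diagonals _ _
  unfold Spec_isValidPercolation
  exact pv_equal grid diagonals
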